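-- pv_equiv track=rewrite | github.com/PeterHumby/Advent-of-Code | 2023/Day 14.py | get_load
-- ===== SOURCE A (Python) =====
-- def transpose(block): # Transpose a matrix stored as a list of lists.
--     m = len(block)
--     n = len(block[0])
--
--     t_block = [[0 for i in range(m)] for i in range(n)]
--
--
--     for i in range(m):
--         for j in range(n):
--             t_block[j][i] = block[i][j]
--
--     return t_block
--
-- def get_load(grid):
--     grid = transpose(grid)
--     grid = [row[::-1] for row in grid]
--
--     total = 0
--
--     for _, row in enumerate(grid):
--         for i, c in enumerate(row):
--             if c == 'O':
--                 total += (i + 1)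
--
--     return total
-- ===== SOURCE B (Python) =====
-- def get_load(grid):
--     rows = len(grid)
--     cols = len(grid[0])
--     return sum(rows - i
--                for i in range(rows)
--                for j in range(cols)
--                if grid[i][j] == 'O')
-- ===== Notes on version B (the rewrite author's own statement) =====
-- stated objective: simpler
-- what changed: B drops A's materialised transpose and per-row reversal and computes the load in one direct indexed pass over the original grid: an 'O' at row i contributes rows - i.
import Mathlib
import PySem

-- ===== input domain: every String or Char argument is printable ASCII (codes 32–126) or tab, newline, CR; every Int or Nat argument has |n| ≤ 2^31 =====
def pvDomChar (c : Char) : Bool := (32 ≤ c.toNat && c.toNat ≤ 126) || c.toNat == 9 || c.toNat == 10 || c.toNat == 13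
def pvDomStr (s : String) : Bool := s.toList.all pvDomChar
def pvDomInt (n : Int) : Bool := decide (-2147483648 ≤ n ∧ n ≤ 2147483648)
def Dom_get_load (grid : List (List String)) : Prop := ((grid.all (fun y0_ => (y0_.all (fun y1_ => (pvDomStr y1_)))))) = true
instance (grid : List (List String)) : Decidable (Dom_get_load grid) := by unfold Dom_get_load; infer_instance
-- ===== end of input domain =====

-- B replaces A's materialised transpose + row reversal by one direct indexed pass
-- (an 'O' at row i contributes rows - i): simpler, no intermediate matrices.

-- ===== PORT A =====
-- transpose(block): builds an n×m table and assigns t_block[j][i] = block[i][j].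
-- Python seeds the table with the int 0; inside Pre_get_load every cell is
-- overwritten before use, so the seed "" is never observed.
def pvTranspose (block : List (List String)) : List (List String) :=
  let m := block.length
  let n := (block.headD []).length
  let t0 : List (List String) := List.replicate n (List.replicate m "")
  (List.range m).foldl (fun t i =>
    (List.range n).foldl (fun t j =>
      t.modify j (fun row => row.set i ((block.getD i []).getD j ""))) t) t0

def get_load (grid : List (List String)) : Int :=
  let grid1 := pvTranspose grid
  let grid2 := grid1.map List.reverse
  grid2.foldl (fun total row =>
    (PySem.List.enumerate row).foldl (fun total p =>
      if p.2 = "O" then total + (p.1 + 1) else total) total) 0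

-- ===== PORT B =====
def get_load_alt (grid : List (List String)) : Int :=
  let rows := grid.length
  let cols := (grid.headD []).length
  (List.range rows).foldl (fun acc i =>
    (List.range cols).foldl (fun acc j =>
      if (grid.getD i []).getD j "" = "O" then acc + ((rows : Int) - (i : Int)) else acc) acc) 0

-- ===== PRECONDITION & SPEC =====
-- Pre_ excludes exactly the inputs where Python A raises IndexError: the empty
-- grid (len(grid[0])) and ragged grids with a row shorter than the first row
-- (block[i][j] in transpose). B raises IndexError on the same inputs.
def Pre_get_load (grid : List (List String)) : Prop :=
  grid ≠ [] ∧ ∀ row ∈ grid, (grid.headD []).length ≤ row.length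
instance (grid : List (List String)) : Decidable (Pre_get_load grid) := by unfold Pre_get_load; infer_instance

def pvWitness_get_load : List (List String) := [["O", "."], [".", "O"], ["O", "O"]]

def Spec_get_load (grid : List (List String)) (out : Int) : Prop := out = get_load_alt grid
instance (grid : List (List String)) (out : Int) : Decidable (Spec_get_load grid out) := by unfold Spec_get_load; infer_instance

-- ===== CLAIM (what is proved, stated in full; the proofs are below) =====
def Claim_equal_get_load : Prop := ∀ (grid : List (List String)), Dom_get_load grid → Pre_get_load grid → Spec_get_load grid (get_load grid)

-- ===== LEMMAS AND PROOFS =====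

-- cell i j = grid[i][j] with default "" (both ports index through the same expression)
def pvCellOf (grid : List (List String)) (i j : Nat) : String := (grid.getD i []).getD j ""

theorem pvCellOf_def (grid : List (List String)) (i j : Nat) :
    (grid.getD i []).getD j "" = pvCellOf grid i j := rfl

-- a foldl whose step preserves length preserves length
theorem pv_foldl_len {α : Type} (l : List α) (t : List (List String))
    (g : List (List String) → α → List (List String))
    (h : ∀ t a, (g t a).length = t.length) : (l.foldl g t).length = t.length := by
  induction l generalizing t with
  | nil => rfl
  | cons x xs ih => simp [List.foldl, ih, h]

theorem pv_foldl_set_len {α : Type} (l : List α) (r : List String) (g : α → String) (pos : α → Nat) :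
    (l.foldl (fun row a => row.set (pos a) (g a)) r).length = r.length := by
  induction l generalizing r with
  | nil => rfl
  | cons x xs ih => simp [List.foldl, ih]

-- pointwise value of the inner 'for j' loop of transpose
theorem pv_inner_get (i : Nat) (f : Nat → String) (j' : Nat) :
    ∀ (l : List Nat) (t : List (List String)),
    (l.foldl (fun t j => t.modify j (fun row => row.set i (f j))) t).getD j' []
      = if j' ∈ l then (t.getD j' []).set i (f j') else t.getD j' [] := by
  intro l
  induction l with
  | nil => simp
  | cons x xs ih =>
    intro t
    simp only [List.foldl_cons, ih]
    have hmod : (t.modify x fun row => row.set i (f x)).getD j' [] =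
        if j' = x then (t.getD j' []).set i (f x) else t.getD j' [] := by
      simp only [List.getD, List.getElem?_modify]
      by_cases hx : x = j'
      · subst hx; cases t[x]? <;> simp
      · cases t[j']? <;> simp [hx, show ¬ j' = x from fun h => hx h.symm]
    rw [hmod]
    by_cases hx : j' = x <;> by_cases hm : j' ∈ xs <;> simp [hx, hm, List.set_set]

-- pointwise value of the outer 'for i' loop: column j' accumulates its sets
theorem pv_outer_get (grid : List (List String)) (n j' : Nat) (hj : j' < n) :
    ∀ (l : List Nat) (t : List (List String)),
    (l.foldl (fun t i =>
        (List.range n).foldl (fun t j =>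
          t.modify j (fun row => row.set i (pvCellOf grid i j))) t) t).getD j' []
      = l.foldl (fun row i => row.set i (pvCellOf grid i j')) (t.getD j' []) := by
  intro l
  induction l with
  | nil => intro t; rfl
  | cons x xs ih =>
    intro t
    simp only [List.foldl_cons, ih]
    rw [pv_inner_get]
    simp [hj]

-- pointwise value of a row built by repeated set
theorem pv_row_get (g : Nat → String) (i' : Nat) :
    ∀ (l : List Nat) (r : List String), i' < r.length →
    (l.foldl (fun row i => row.set i (g i)) r).getD i' ""
      = if i' ∈ l then g i' else r.getD i' "" := by
  intro l
  induction l with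
  | nil => intro r _; simp
  | cons x xs ih =>
    intro r hr
    simp only [List.foldl_cons]
    rw [ih _ (by simpa using hr)]
    by_cases hx : i' = x
    · subst hx
      by_cases hm : i' ∈ xs <;> simp [hm, List.getD, hr]
    · by_cases hm : i' ∈ xs <;> simp [hm, hx, Ne.symm hx, List.getD]

-- the transpose: length n, row j (j < n) has length m with entries cell i j
theorem pvTranspose_len (grid : List (List String)) :
    (pvTranspose grid).length = (grid.headD []).length := by
  simp only [pvTranspose]
  rw [pv_foldl_len]
  · simp
  · intro t a
    exact pv_foldl_len _ _ _ (fun t b => List.length_modify ..)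

theorem pvTranspose_get (grid : List (List String)) (j : Nat)
    (hj : j < (grid.headD []).length) :
    (pvTranspose grid).getD j []
      = (List.range grid.length).foldl
          (fun row i => row.set i (pvCellOf grid i j)) (List.replicate grid.length "") := by
  simp only [pvTranspose, pvCellOf_def]
  rw [pv_outer_get grid _ j hj]
  have hj' : j < (grid.head?.getD []).length := by
    simpa [List.headD_eq_head?_getD] using hj
  simp [List.getD, hj']

theorem pvCol_len (grid : List (List String)) (j : Nat)
    (hj : j < (grid.headD []).length) :
    ((pvTranspose grid).getD j []).length = grid.length := by
  rw [pvTranspose_get grid j hj, pv_foldl_set_len]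
  simp

theorem pvCol_get (grid : List (List String)) (j i : Nat)
    (hj : j < (grid.headD []).length) (hi : i < grid.length) :
    ((pvTranspose grid).getD j []).getD i "" = pvCellOf grid i j := by
  rw [pvTranspose_get grid j hj, pv_row_get _ i _ _ (by simpa using hi)]
  simp [hi]

-- the inner enumerate-loop of A is a shifted conditional sum
theorem pv_enum_sum :
    ∀ (r : List String) (s a : Int),
    (PySem.List.enumerate r s).foldl
        (fun total p => if p.2 = "O" then total + (p.1 + 1) else total) a
      = a + ∑ k ∈ Finset.range r.length, (if r.getD k "" = "O" then s + k + 1 else 0) := by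
  intro r
  induction r with
  | nil => intro s a; simp [PySem.List.enumerate_nil]
  | cons x xs ih =>
    intro s a
    rw [PySem.List.enumerate_cons, List.foldl_cons, ih]
    simp only [List.length_cons]
    rw [Finset.sum_range_succ']
    simp only [List.getD_cons_succ, List.getD_cons_zero]
    have : ∀ k : ℕ, (if xs.getD k "" = "O" then s + 1 + ↑k + 1 else 0)
        = (if xs.getD k "" = "O" then s + ↑(k + 1) + 1 else 0) := by
      intro k; split <;> push_cast <;> ring
    rw [Finset.sum_congr rfl (fun k _ => this k)]
    by_cases hx : x = "O" <;> simp [hx] <;> ring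

-- generic: fold of conditional additions over a list of indices
theorem pv_foldl_if_add (p : Nat → Prop) [DecidablePred p] (h : Nat → Int) :
    ∀ (l : List Nat) (a : Int),
    l.foldl (fun acc j => if p j then acc + h j else acc) a
      = a + (l.map (fun j => if p j then h j else 0)).sum := by
  intro l
  induction l with
  | nil => intro a; simp
  | cons x xs ih =>
    intro a
    rw [List.foldl_cons, ih]
    by_cases hx : p x <;> simp [hx] <;> ring

-- list-map sum over getD = Finset sum
theorem pv_map_sum_getD {α : Type} (f : α → Int) (d : α) :
    ∀ (l : List α), (l.map f).sum = ∑ j ∈ Finset.range l.length, f (l.getD j d) := by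
  intro l
  induction l with
  | nil => simp
  | cons x xs ih =>
    rw [List.map_cons, List.sum_cons, ih, List.length_cons, Finset.sum_range_succ']
    simp [add_comm]

theorem pv_range_map_sum (n : Nat) (f : Nat → Int) :
    ((List.range n).map f).sum = ∑ j ∈ Finset.range n, f j := by
  rw [pv_map_sum_getD f 0]
  simp only [List.length_range]
  exact Finset.sum_congr rfl (fun j hj => by
    rw [List.getD, List.getElem?_range (by simpa using hj)]; rfl)

-- A's value as a double Finset sum (columns outside, reflected rows inside)
theorem pv_A_sum (grid : List (List String)) :
    get_load grid
      = ∑ j ∈ Finset.range (grid.headD []).length,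
          ∑ i ∈ Finset.range grid.length,
            (if pvCellOf grid i j = "O" then (grid.length : Int) - i else 0) := by
  set m := grid.length with hm
  set n := (grid.headD []).length with hn
  simp only [get_load]
  -- rewrite each row's enumerate-loop, then the row loop, into sums
  have hrows : ∀ (rows : List (List String)) (a : Int),
      rows.foldl (fun total row =>
        (PySem.List.enumerate row).foldl
          (fun total p => if p.2 = "O" then total + (p.1 + 1) else total) total) a
      = a + (rows.map (fun row => ∑ k ∈ Finset.range row.length,
              (if row.getD k "" = "O" then (k : Int) + 1 else 0))).sum := by
    intro rows
    induction rows with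
    | nil => intro a; simp
    | cons r rs ih =>
      intro a
      rw [List.foldl_cons, ih, pv_enum_sum]
      simp only [List.map_cons, List.sum_cons]
      have : ∀ k : ℕ, (if r.getD k "" = "O" then (0 : Int) + k + 1 else 0)
          = (if r.getD k "" = "O" then (k : Int) + 1 else 0) := by
        intro k; split <;> ring
      rw [Finset.sum_congr rfl (fun k _ => this k)]
      ring
  rw [hrows, zero_add]
  rw [pv_map_sum_getD _ []]
  simp only [List.length_map]
  rw [pvTranspose_len grid, ← hn]
  apply Finset.sum_congr rfl
  intro j hj
  have hjn : j < n := by simpa using hj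
  have hget : ((pvTranspose grid).map List.reverse).getD j []
      = ((pvTranspose grid).getD j []).reverse := by
    have hjlen : j < (pvTranspose grid).length := by rw [pvTranspose_len]; exact hjn
    simp [List.getD, List.getElem?_map, List.getElem?_eq_getElem hjlen]
  rw [hget]
  set c := (pvTranspose grid).getD j [] with hc
  have hclen : c.length = m := pvCol_len grid j hjn
  rw [List.length_reverse, hclen]
  -- reverse the inner sum
  have hrev : ∀ k, k < m → c.reverse.getD k "" = pvCellOf grid (m - 1 - k) j := by
    intro k hk
    have hk' : k < c.reverse.length := by rw [List.length_reverse, hclen]; exact hk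
    rw [List.getD, List.getElem?_eq_getElem hk', Option.getD_some, List.getElem_reverse]
    simp only [hclen]
    rw [← pvCol_get grid j (m - 1 - k) hjn (by omega)]
    rw [List.getD, List.getElem?_eq_getElem (by rw [hclen]; omega : m - 1 - k < c.length), Option.getD_some]
  calc (∑ k ∈ Finset.range m, (if c.reverse.getD k "" = "O" then (k : Int) + 1 else 0))
      = ∑ k ∈ Finset.range m,
          (if pvCellOf grid (m - 1 - k) j = "O" then (m : Int) - (m - 1 - k : Nat) else 0) := by
        apply Finset.sum_congr rfl
        intro k hk
        have hk' : k < m := by simpa using hk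
        rw [hrev k hk']
        split
        · omega
        · rfl
    _ = ∑ i ∈ Finset.range m, (if pvCellOf grid i j = "O" then (m : Int) - i else 0) :=
        Finset.sum_range_reflect (fun i => if pvCellOf grid i j = "O" then (m : Int) - i else 0) m

-- B's value as the same double sum, rows outside
theorem pv_B_sum (grid : List (List String)) :
    get_load_alt grid
      = ∑ i ∈ Finset.range grid.length,
          ∑ j ∈ Finset.range (grid.headD []).length,
            (if pvCellOf grid i j = "O" then (grid.length : Int) - i else 0) := by
  simp only [get_load_alt]
  have hinner : ∀ (i : Nat) (a : Int),
      (List.range (grid.headD []).length).foldl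
        (fun acc j => if (grid.getD i []).getD j "" = "O" then acc + ((grid.length : Int) - i) else acc) a
      = a + ∑ j ∈ Finset.range (grid.headD []).length,
          (if pvCellOf grid i j = "O" then (grid.length : Int) - i else 0) := by
    intro i a
    rw [pv_foldl_if_add (fun j => (grid.getD i []).getD j "" = "O") (fun _ => (grid.length : Int) - i)]
    rw [pv_range_map_sum]
    rfl
  have hcong := PySem.List.foldl_congr_mem
      (l := List.range grid.length) (init := (0 : Int))
      (f := fun acc i => (List.range (grid.headD []).length).foldl
        (fun acc j => if (grid.getD i []).getD j "" = "O" then acc + ((grid.length : Int) - (i : Int)) else acc) acc)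
      (g := fun acc i => acc + ∑ j ∈ Finset.range (grid.headD []).length,
        (if pvCellOf grid i j = "O" then (grid.length : Int) - (i : Int) else 0))
      (fun acc i _ => hinner i acc)
  rw [hcong, PySem.List.foldl_add, zero_add, pv_range_map_sum]

-- ===== VERDICT (by name: the statement is the Claim_ definition above) =====
theorem get_load_spec : Claim_equal_get_load := by
  intro grid _ _
  unfold Spec_get_load
  rw [pv_A_sum, pv_B_sum]
  exact Finset.sum_comm
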